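-- pv_equiv track=rewrite | github.com/eoc940/Python-data_structure-and-algorithm_PS | programmers-algorythm/search/immigration_re.py | solution
-- ===== SOURCE A (Python) =====
-- def solution(n, times):
--     answer = 0
--     lt = 0
--     rt = max(times) * n
--
--     while lt <= rt:
--         mid = (lt + rt) // 2
--         people = 0
--         for time in times:
--             people += mid // time
--
--         if people < n:
--             lt = mid + 1
--         else:
--             rt = mid - 1
--             answer = mid
--
--     return answer
-- ===== SOURCE B (Python) =====
-- def solution(n, times):
--     # Rational-bound candidate enumeration, no search loop: with the combined rate
--     # R = sum(1/t) the answer lies in [ceil(n/R), ceil((n+m)/R)], and it must be a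
--     # multiple of some booth time; only ~3*m such multiples fall in that window, so
--     # test each and keep the smallest one serving at least n people.
--     if n <= 0:
--         return 0
--     D = 1
--     for t in times:
--         D *= t
--     S = sum(D // t for t in times)          # R = S / D
--     L = -((-n * D) // S)                    # ceil(n*D / S)
--     U = -((-(n + len(times)) * D) // S)     # ceil((n+m)*D / S)
--     best = None
--     for t in times:
--         for k in range((L + t - 1) // t, U // t + 1):
--             c = k * t
--             if sum(c // x for x in times) >= n and (best is None or c < best):
--                 best = c
--     return best
-- ===== Notes on version B (the rewrite author's own statement) =====
-- stated objective: alternative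
-- what changed: Replaces A's binary search over candidate times by direct candidate enumeration: using the combined service rate R = sum(1/t) (as the exact fraction S/D), the answer is bracketed in [ceil(n/R), ceil((n+m)/R)], and since it must be a multiple of some booth time only ~3m multiples fall in that window; B tests each and returns the smallest serving at least n people.
-- outside the precondition, e.g. on solution(1, [-2]): A returns 0, B returns -4; on solution(2, [-3, 5]): A returns 0, B returns -30; on solution(1, [2, 0]): A raises ZeroDivisionError, B raises ZeroDivisionError
import Mathlib
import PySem

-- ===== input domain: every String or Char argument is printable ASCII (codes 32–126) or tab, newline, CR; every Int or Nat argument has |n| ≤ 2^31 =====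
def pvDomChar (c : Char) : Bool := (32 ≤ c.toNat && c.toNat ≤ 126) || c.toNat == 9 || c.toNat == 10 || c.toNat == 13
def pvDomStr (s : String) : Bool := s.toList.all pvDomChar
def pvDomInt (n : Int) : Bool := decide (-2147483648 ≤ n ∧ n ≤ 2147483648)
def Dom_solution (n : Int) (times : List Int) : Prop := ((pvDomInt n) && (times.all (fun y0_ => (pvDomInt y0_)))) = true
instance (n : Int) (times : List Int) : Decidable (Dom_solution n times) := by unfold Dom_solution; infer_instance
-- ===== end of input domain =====

-- B replaces A's binary search by rational-bound candidate enumeration: with R = sum(1/t) the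
-- answer lies in [ceil(n/R), ceil((n+m)/R)] and is a multiple of some booth time; B tests just
-- those few multiples and returns the smallest serving >= n people; objective: alternative.

-- ===== PORT A =====
-- A-side helper: the inner 'for time in times: people += mid // time' loop
def pvCount (times : List Int) (mid : Int) : Int :=
  times.foldl (fun people time => people + PySem.Int.floordiv mid time) 0

-- the 'while lt <= rt' loop of A ('mid = (lt + rt) // 2' written inline)
def pvLoopA (times : List Int) (n lt rt answer : Int) : Int :=
  if _h : lt ≤ rt then
    if pvCount times (PySem.Int.floordiv (lt + rt) 2) < n then
      pvLoopA times n (PySem.Int.floordiv (lt + rt) 2 + 1) rt answer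
    else
      pvLoopA times n lt (PySem.Int.floordiv (lt + rt) 2 - 1) (PySem.Int.floordiv (lt + rt) 2)
  else answer
termination_by (rt + 1 - lt).toNat
decreasing_by
  · have hm := PySem.Int.floordiv_two_mid_bounds _h; omega
  · have hm := PySem.Int.floordiv_two_mid_bounds _h; omega

def solution (n : Int) (times : List Int) : Int :=
  -- rt = max(times) * n; the `.getD 0` is unreachable under Pre_solution (times ≠ [])
  pvLoopA times n 0 (((PySem.List.max? times (fun t => t)).getD 0) * n) 0

-- ===== PORT B =====
-- Source B's 'D = 1; for t in times: D *= t'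
def pvD (times : List Int) : Int := times.foldl (fun a t => a * t) 1

-- Source B's 'S = sum(D // t for t in times)'
def pvS (times : List Int) : Int :=
  times.foldl (fun a t => a + PySem.Int.floordiv (pvD times) t) 0

-- Source B's 'L = -((-n * D) // S)' and 'U = -((-(n + len(times)) * D) // S)'
def pvL (n : Int) (times : List Int) : Int :=
  -(PySem.Int.floordiv (-n * pvD times) (pvS times))
def pvU (n : Int) (times : List Int) : Int :=
  -(PySem.Int.floordiv (-(n + times.length) * pvD times) (pvS times))

-- Source B's 'if sum(c // x for x in times) >= n and (best is None or c < best): best = c'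
def pvBestStep (times : List Int) (n : Int) (best : Option Int) (c : Int) : Option Int :=
  if n ≤ pvCount times c then
    match best with
    | none => some c
    | some b => if c < b then some c else some b
  else best

-- Source B's inner 'for k in range((L + t - 1) // t, U // t + 1)' loop
def pvInner (times : List Int) (n L U : Int) (best : Option Int) (t : Int) : Option Int :=
  (PySem.List.pyRange (PySem.Int.floordiv (L + t - 1) t) (PySem.Int.floordiv U t + 1) 1).foldl
    (fun b k => pvBestStep times n b (k * t)) best

def solution_alt (n : Int) (times : List Int) : Int :=
  if n ≤ 0 then 0
  else
    -- Python's 'best' is None only when no candidate qualifies, which cannot happen under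
    -- Pre_solution; '.getD 0' renders that unreachable branch
    (times.foldl (pvInner times n (pvL n times) (pvU n times)) none).getD 0

-- ===== PRECONDITION & SPEC =====
-- Pre_ keeps the task's natural domain — a nonempty list of POSITIVE booth times — and, in addition,
-- the trivial n ≤ 0 inputs on which both programs return 0 (n < 0 with some positive time; n = 0 with
-- no zero time). Excluded: empty times (A raises ValueError), a zero time hit by the search (A raises
-- ZeroDivisionError), and nonpositive times with n > 0 — meaningless processing times on which A's
-- binary search over [0, max·n] returns an accidental value.
def Pre_solution (n : Int) (times : List Int) : Prop :=
  times ≠ [] ∧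
    ((∀ t ∈ times, 0 < t) ∨ (n < 0 ∧ ∃ t ∈ times, 0 < t) ∨ (n = 0 ∧ (0 : Int) ∉ times))
instance (n : Int) (times : List Int) : Decidable (Pre_solution n times) := by unfold Pre_solution; infer_instance

def pvWitness_solution : Int × List Int := (6, [7, 10])

def Spec_solution (n : Int) (times : List Int) (out : Int) : Prop := out = solution_alt n times
instance (n : Int) (times : List Int) (out : Int) : Decidable (Spec_solution n times out) := by unfold Spec_solution; infer_instance

-- ===== CLAIM (what is proved, stated in full; the proofs are below) =====
def Claim_equal_solution : Prop := ∀ (n : Int) (times : List Int), Dom_solution n times → Pre_solution n times → Spec_solution n times (solution n times)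

-- ===== LEMMAS AND PROOFS =====

-- The answer characterisation both programs are proved to satisfy: r is the least T ≥ 0 with count(T) ≥ n.
def IsAns (n : Int) (times : List Int) (r : Int) : Prop :=
  0 ≤ r ∧ n ≤ pvCount times r ∧ ∀ T : Int, 0 ≤ T → T < r → pvCount times T < n

lemma pvCount_eq_sum (times : List Int) (T : Int) (hpos : ∀ t ∈ times, 0 < t) :
    pvCount times T = (times.map (fun t => T / t)).sum := by
  unfold pvCount
  rw [PySem.List.foldl_add times (fun t => PySem.Int.floordiv T t) 0, zero_add]
  congr 1
  exact List.map_congr_left (fun t ht => PySem.Int.floordiv_eq_ediv_of_pos (hpos t ht))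

lemma cnt_nonneg {times : List Int} {T : Int} (hpos : ∀ t ∈ times, 0 < t) (hT : 0 ≤ T) :
    0 ≤ pvCount times T := by
  rw [pvCount_eq_sum times T hpos]
  apply List.sum_nonneg
  intro x hx
  obtain ⟨t, ht, rfl⟩ := List.mem_map.1 hx
  exact Int.ediv_nonneg hT (le_of_lt (hpos t ht))

lemma cnt_mono {times : List Int} {T T' : Int} (hpos : ∀ t ∈ times, 0 < t) (h : T ≤ T') :
    pvCount times T ≤ pvCount times T' := by
  rw [pvCount_eq_sum times T hpos, pvCount_eq_sum times T' hpos]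
  exact List.sum_le_sum (fun t ht => Int.ediv_le_ediv (hpos t ht) h)

lemma cnt_zero {times : List Int} : pvCount times 0 = 0 := by
  unfold pvCount
  rw [PySem.List.foldl_add times (fun t => PySem.Int.floordiv 0 t) 0, zero_add]
  apply List.sum_eq_zero
  intro x hx
  obtain ⟨t, ht, rfl⟩ := List.mem_map.1 hx
  show PySem.Int.floordiv 0 t = 0
  simp [PySem.Int.floordiv, Int.zero_fdiv]

lemma isAns_nonpos {n r : Int} {times : List Int} (hpos : ∀ t ∈ times, 0 < t)
    (hn : n ≤ 0) (h : IsAns n times r) : r = 0 := by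
  obtain ⟨h0, _, hm⟩ := h
  by_contra hne
  have h1 : (0 : Int) < r := lt_of_le_of_ne h0 (Ne.symm hne)
  have h2 := hm 0 le_rfl h1
  have h3 := cnt_nonneg hpos (le_refl (0 : Int))
  omega

lemma cnt_upper {times : List Int} {M n : Int} (hpos : ∀ t ∈ times, 0 < t)
    (hM : M ∈ times) (hn : 0 ≤ n) : n ≤ pvCount times (M * n) := by
  have hMpos := hpos M hM
  have hMn : 0 ≤ M * n := mul_nonneg (le_of_lt hMpos) hn
  rw [pvCount_eq_sum times (M * n) hpos]
  have hself : M * n / M = n := by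
    rw [mul_comm]; exact Int.mul_ediv_cancel n (ne_of_gt hMpos)
  calc n = M * n / M := hself.symm
    _ ≤ _ := by
        apply List.single_le_sum (l := times.map (fun t => M * n / t))
        · intro x hx
          obtain ⟨t, ht, rfl⟩ := List.mem_map.1 hx
          exact Int.ediv_nonneg hMn (le_of_lt (hpos t ht))
        · exact List.mem_map.2 ⟨M, hM, rfl⟩

-- ---- A side: the binary search maintains the standard invariant and lands on IsAns ----

lemma loopA_exit {times : List Int} {n R0 lt rt answer : Int}
    (hpos : ∀ t ∈ times, 0 < t) (hM : ∃ M ∈ times, R0 = M * n)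
    (hlr : ¬ lt ≤ rt) (h0 : 0 ≤ lt) (h1 : lt ≤ rt + 1)
    (h2 : ∀ T : Int, 0 ≤ T → T < lt → pvCount times T < n)
    (h3 : (answer = 0 ∧ rt = R0) ∨ (n ≤ pvCount times answer ∧ answer = rt + 1)) :
    IsAns n times answer := by
  have hlt : lt = rt + 1 := by omega
  rcases h3 with ⟨ha, hrt⟩ | ⟨hc, ha⟩
  · obtain ⟨M, hMm, hR0⟩ := hM
    have hMpos := hpos M hMm
    by_cases hn : 0 ≤ n
    · have hup := cnt_upper hpos hMm hn
      have hMn : 0 ≤ M * n := mul_nonneg (le_of_lt hMpos) hn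
      have := h2 (M * n) hMn (by omega)
      omega
    · subst ha
      refine ⟨le_rfl, ?_, ?_⟩
      · have := cnt_nonneg hpos (le_refl (0 : Int))
        omega
      · intro T hT hT0; omega
  · exact ⟨by omega, hc, fun T hT hT' => h2 T hT (by omega)⟩

lemma loopA_correct {times : List Int} {n R0 : Int}
    (hpos : ∀ t ∈ times, 0 < t) (hM : ∃ M ∈ times, R0 = M * n) :
    ∀ (k : Nat) (lt rt answer : Int), (rt + 1 - lt).toNat ≤ k → 0 ≤ lt → lt ≤ rt + 1 →
      (∀ T : Int, 0 ≤ T → T < lt → pvCount times T < n) →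
      ((answer = 0 ∧ rt = R0) ∨ (n ≤ pvCount times answer ∧ answer = rt + 1)) →
      IsAns n times (pvLoopA times n lt rt answer) := by
  intro k
  induction k with
  | zero =>
    intro lt rt answer hk h0 h1 h2 h3
    have hlr : ¬ lt ≤ rt := by omega
    rw [pvLoopA, dif_neg hlr]
    exact loopA_exit hpos hM hlr h0 h1 h2 h3
  | succ k ih =>
    intro lt rt answer hk h0 h1 h2 h3
    rw [pvLoopA]
    by_cases hlr : lt ≤ rt
    · rw [dif_pos hlr]
      have hm := PySem.Int.floordiv_two_mid_bounds hlr
      set mid := PySem.Int.floordiv (lt + rt) 2 with hmid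
      by_cases hc : pvCount times mid < n
      · rw [if_pos hc]
        refine ih (mid + 1) rt answer (by omega) (by omega) (by omega) ?_ ?_
        · intro T hT hT'
          by_cases hTlt : T < lt
          · exact h2 T hT hTlt
          · exact lt_of_le_of_lt (cnt_mono hpos (by omega)) hc
        · rcases h3 with h | h
          · exact Or.inl h
          · exact Or.inr h
      · rw [if_neg hc]
        refine ih lt (mid - 1) mid (by omega) h0 (by omega) h2 ?_
        exact Or.inr ⟨not_lt.1 hc, by omega⟩
    · rw [dif_neg hlr]
      exact loopA_exit hpos hM hlr h0 h1 h2 h3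

-- ---- B side: window bounds, candidate structure, and the min-fold ----

-- per-element: (T//t)*D ≤ T*(D//t) when t ∣ D
lemma elt_upper {t D T : Int} (ht : 0 < t) (hD : 0 < D) (hdvd : t ∣ D) :
    T / t * D ≤ T * (D / t) := by
  have htD : t * (D / t) = D := Int.mul_ediv_cancel' hdvd
  have he : 0 ≤ D / t := Int.ediv_nonneg (le_of_lt hD) (le_of_lt ht)
  have h1 : T / t * t ≤ T := Int.ediv_mul_le T (ne_of_gt ht)
  have h2 : T / t * D = T / t * (t * (D / t)) := by rw [htD]
  calc T / t * D = T / t * t * (D / t) := by rw [h2, mul_assoc]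
    _ ≤ T * (D / t) := mul_le_mul_of_nonneg_right h1 he

-- per-element: U*(D//t) - D + 1 ≤ (U//t)*D when t ∣ D and 0 < D
lemma elt_lower {t D U : Int} (ht : 0 < t) (hD : 0 < D) (hdvd : t ∣ D) :
    U * (D / t) - D + 1 ≤ U / t * D := by
  have htD : t * (D / t) = D := Int.mul_ediv_cancel' hdvd
  have he1 : 1 ≤ D / t := by
    rw [Int.le_ediv_iff_mul_le ht, one_mul]
    exact Int.le_of_dvd hD hdvd
  have h1 : U < (U / t + 1) * t := Int.lt_ediv_add_one_mul_self U ht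
  rw [add_mul, one_mul] at h1
  have h3 : U - t + 1 ≤ U / t * t := by omega
  have h4 : (U - t + 1) * (D / t) ≤ U / t * t * (D / t) :=
    mul_le_mul_of_nonneg_right h3 (by omega)
  have h5 : U / t * t * (D / t) = U / t * D := by rw [mul_assoc, htD]
  nlinarith [h4, h5, htD, he1]

lemma sum_upper {D : Int} (hD : 0 < D) (T : Int) :
    ∀ (l : List Int), (∀ t ∈ l, 0 < t ∧ t ∣ D) →
      ((l.map (fun t => T / t)).sum) * D ≤ T * ((l.map (fun t => D / t)).sum) := by
  intro l
  induction l with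
  | nil => intro _; simp
  | cons t l ih =>
    intro h
    obtain ⟨ht, hdvd⟩ := h t (List.mem_cons_self ..)
    have hrest := ih (fun x hx => h x (List.mem_cons_of_mem _ hx))
    have hhead := elt_upper (T := T) ht hD hdvd
    simp only [List.map_cons, List.sum_cons]
    nlinarith [hhead, hrest]

lemma sum_lower {D : Int} (hD : 0 < D) (U : Int) :
    ∀ (l : List Int), (∀ t ∈ l, 0 < t ∧ t ∣ D) →
      U * ((l.map (fun t => D / t)).sum) - l.length * D + l.length ≤
        ((l.map (fun t => U / t)).sum) * D := by
  intro l
  induction l with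
  | nil => intro _; simp
  | cons t l ih =>
    intro h
    obtain ⟨ht, hdvd⟩ := h t (List.mem_cons_self ..)
    have hrest := ih (fun x hx => h x (List.mem_cons_of_mem _ hx))
    have hhead := elt_lower (U := U) ht hD hdvd
    simp only [List.map_cons, List.sum_cons, List.length_cons]
    push_cast
    nlinarith [hhead, hrest]

-- if t does not divide r, the count contribution of t is the same at r-1 and r
lemma ediv_pred_eq {t r : Int} (ht : 0 < t) (hnd : ¬ t ∣ r) : (r - 1) / t = r / t := by
  have hm0 : r % t ≠ 0 := fun h => hnd (Int.dvd_of_emod_eq_zero h)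
  have hmn : 0 ≤ r % t := Int.emod_nonneg r (ne_of_gt ht)
  have hml : r % t < t := Int.emod_lt_of_pos r ht
  have hre : r - 1 = (r % t - 1) + r / t * t := by
    have := Int.ediv_add_emod r t; linarith
  rw [hre, Int.add_mul_ediv_right _ _ (ne_of_gt ht),
    Int.ediv_eq_zero_of_lt (by omega) (by omega), zero_add]

lemma exists_dvd_of_count_jump {times : List Int} {r : Int}
    (hpos : ∀ t ∈ times, 0 < t) (hlt : pvCount times (r - 1) < pvCount times r) :
    ∃ t ∈ times, t ∣ r := by
  by_contra hnone
  push_neg at hnone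
  have : pvCount times (r - 1) = pvCount times r := by
    rw [pvCount_eq_sum times (r - 1) hpos, pvCount_eq_sum times r hpos]
    congr 1
    exact List.map_congr_left (fun t ht => ediv_pred_eq (hpos t ht) (hnone t ht))
  omega

-- ---- the min-fold over candidates ----

-- invariant: anything stored in 'best' is a qualifying candidate, hence ≥ r
def BInv (times : List Int) (n r : Int) (best : Option Int) : Prop :=
  ∀ b, best = some b → n ≤ pvCount times b ∧ r ≤ b

lemma step_BInv {times : List Int} {n r c : Int} {best : Option Int}
    (hr : IsAns n times r) (hc : 0 ≤ c) (h : BInv times n r best) :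
    BInv times n r (pvBestStep times n best c) := by
  intro b hb
  unfold pvBestStep at hb
  by_cases hp : n ≤ pvCount times c
  · have hcr : r ≤ c := by
      by_contra hlt
      exact absurd hp (not_le.2 (hr.2.2 c hc (by omega)))
    rw [if_pos hp] at hb
    cases hbest : best with
    | none => rw [hbest] at hb; simp at hb; subst hb; exact ⟨hp, hcr⟩
    | some b0 =>
      rw [hbest] at hb
      simp only at hb
      split_ifs at hb with h2 <;> (simp at hb; subst hb)
      · exact ⟨hp, hcr⟩
      · exact h b0 hbest
  · rw [if_neg hp] at hb
    exact h b hb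

lemma fold_BInv {times : List Int} {n r t : Int} {best : Option Int}
    (hr : IsAns n times r) :
    ∀ (ks : List Int), (∀ k ∈ ks, 0 ≤ k * t) → BInv times n r best →
      BInv times n r (ks.foldl (fun b k => pvBestStep times n b (k * t)) best) := by
  intro ks
  induction ks generalizing best with
  | nil => intro _ h; exact h
  | cons k ks ih =>
    intro hb h
    exact ih (fun k' hk' => hb k' (List.mem_cons_of_mem _ hk'))
      (step_BInv hr (hb k (List.mem_cons_self ..)) h)

lemma step_keep' {times : List Int} {n r c : Int}
    (hr : IsAns n times r) (hc : 0 ≤ c) :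
    pvBestStep times n (some r) c = some r := by
  unfold pvBestStep
  by_cases hp : n ≤ pvCount times c
  · rw [if_pos hp]
    simp only
    rw [if_neg (not_lt.2 (by
      by_contra hlt
      push_neg at hlt
      exact absurd hp (not_le.2 (hr.2.2 c hc hlt))))]
  · rw [if_neg hp]

lemma fold_keep {times : List Int} {n r t : Int} (hr : IsAns n times r) :
    ∀ (ks : List Int), (∀ k ∈ ks, 0 ≤ k * t) →
      ks.foldl (fun b k => pvBestStep times n b (k * t)) (some r) = some r := by
  intro ks
  induction ks with
  | nil => intro _; rfl
  | cons k ks ih =>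
    intro hb
    simp only [List.foldl_cons]
    rw [step_keep' hr (hb k (List.mem_cons_self ..))]
    exact ih (fun k' hk' => hb k' (List.mem_cons_of_mem _ hk'))

lemma fold_hit {times : List Int} {n r t : Int} {best : Option Int}
    (hr : IsAns n times r) (hpred : n ≤ pvCount times r) :
    ∀ (ks : List Int), (∀ k ∈ ks, 0 ≤ k * t) → BInv times n r best →
      (∃ k ∈ ks, k * t = r) →
      ks.foldl (fun b k => pvBestStep times n b (k * t)) best = some r := by
  intro ks
  induction ks generalizing best with
  | nil => intro _ _ h; obtain ⟨k, hk, _⟩ := h; exact absurd hk List.not_mem_nil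
  | cons k ks ih =>
    intro hb hA hex
    simp only [List.foldl_cons]
    obtain ⟨k', hk', hk'r⟩ := hex
    rcases List.mem_cons.1 hk' with rfl | hk'
    · -- this step writes r into best
      have hstep : pvBestStep times n best (k' * t) = some r := by
        unfold pvBestStep
        rw [hk'r, if_pos hpred]
        cases hbest : best with
        | none => rfl
        | some b0 =>
          obtain ⟨_, hrb⟩ := hA b0 hbest
          simp only
          split_ifs with h2
          · rfl
          · exact congrArg some (le_antisymm (not_lt.1 h2) hrb)
      rw [hstep]
      exact fold_keep hr ks (fun k2 hk2 => hb k2 (List.mem_cons_of_mem _ hk2))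
    · exact ih (fun k2 hk2 => hb k2 (List.mem_cons_of_mem _ hk2))
        (step_BInv hr (hb k (List.mem_cons_self ..)) hA) ⟨k', hk', hk'r⟩

-- bounds on every enumerated candidate: k in the range forces k*t ≥ L ≥ 1
lemma cand_nonneg {L U t k : Int} (ht : 0 < t) (hL1 : 1 ≤ L)
    (hk : k ∈ PySem.List.pyRange (PySem.Int.floordiv (L + t - 1) t)
      (PySem.Int.floordiv U t + 1) 1) : 0 ≤ k * t := by
  have hmem := (PySem.List.mem_pyRange_one).1 hk
  rw [PySem.Int.floordiv_eq_ediv_of_pos ht] at hmem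
  have h1 : (L + t - 1) / t ≤ k := hmem.1
  have h2 : L + t - 1 < (k + 1) * t := by
    have := (Int.ediv_lt_iff_lt_mul ht).1 (show (L + t - 1) / t < k + 1 by omega)
    linarith
  nlinarith [h2]

lemma inner_BInv {times : List Int} {n r L U t : Int} {best : Option Int}
    (hr : IsAns n times r) (ht : 0 < t) (hL1 : 1 ≤ L) (h : BInv times n r best) :
    BInv times n r (pvInner times n L U best t) :=
  fold_BInv hr _ (fun k hk => cand_nonneg ht hL1 hk) h

lemma outer_keep {times : List Int} {n r L U : Int} (hr : IsAns n times r) (hL1 : 1 ≤ L) :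
    ∀ (ts : List Int), (∀ t ∈ ts, 0 < t) →
      ts.foldl (pvInner times n L U) (some r) = some r := by
  intro ts
  induction ts with
  | nil => intro _; rfl
  | cons t ts ih =>
    intro hp
    simp only [List.foldl_cons]
    have : pvInner times n L U (some r) t = some r :=
      fold_keep hr _ (fun k hk => cand_nonneg (hp t (List.mem_cons_self ..)) hL1 hk)
    rw [this]
    exact ih (fun t' ht' => hp t' (List.mem_cons_of_mem _ ht'))

lemma outer_hit {times : List Int} {n r L U : Int}
    (hr : IsAns n times r) (hpred : n ≤ pvCount times r) (hL1 : 1 ≤ L) :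
    ∀ (ts : List Int) (best : Option Int), (∀ t ∈ ts, 0 < t) → BInv times n r best →
      (∃ t ∈ ts, ∃ k ∈ PySem.List.pyRange (PySem.Int.floordiv (L + t - 1) t)
        (PySem.Int.floordiv U t + 1) 1, k * t = r) →
      ts.foldl (pvInner times n L U) best = some r := by
  intro ts
  induction ts with
  | nil =>
    intro best _ _ h
    obtain ⟨t, ht, _⟩ := h
    exact absurd ht List.not_mem_nil
  | cons t ts ih =>
    intro best hp hA hex
    simp only [List.foldl_cons]
    obtain ⟨t', ht', k, hk, hkr⟩ := hex
    rcases List.mem_cons.1 ht' with rfl | ht'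
    · have : pvInner times n L U best t' = some r :=
        fold_hit hr hpred _ (fun k2 hk2 => cand_nonneg (hp t' (List.mem_cons_self ..)) hL1 hk2)
          hA ⟨k, hk, hkr⟩
      rw [this]
      exact outer_keep hr hL1 ts (fun t2 ht2 => hp t2 (List.mem_cons_of_mem _ ht2))
    · exact ih (pvInner times n L U best t) (fun t2 ht2 => hp t2 (List.mem_cons_of_mem _ ht2))
        (inner_BInv hr (hp t (List.mem_cons_self ..)) hL1 hA) ⟨t', ht', k, hk, hkr⟩

-- ---- assembling B's value ----

lemma solution_alt_eq {times : List Int} {n r : Int}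
    (hpos : ∀ t ∈ times, 0 < t) (hne : times ≠ []) (hn : 0 < n)
    (hr : IsAns n times r) : solution_alt n times = r := by
  have hDprod : pvD times = times.prod := by
    rw [List.prod_eq_foldl]; rfl
  have hD : 0 < pvD times := by
    rw [hDprod]; exact List.prod_pos hpos
  have hdvdD : ∀ t ∈ times, t ∣ pvD times := by
    intro t ht; rw [hDprod]; exact List.dvd_prod ht
  have hcond : ∀ t ∈ times, 0 < t ∧ t ∣ pvD times := fun t ht => ⟨hpos t ht, hdvdD t ht⟩
  have hSsum : pvS times = (times.map (fun t => pvD times / t)).sum := by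
    unfold pvS
    rw [PySem.List.foldl_add times (fun t => PySem.Int.floordiv (pvD times) t) 0, zero_add]
    congr 1
    exact List.map_congr_left (fun t ht => PySem.Int.floordiv_eq_ediv_of_pos (hpos t ht))
  have hS : 0 < pvS times := by
    obtain ⟨t0, ts0⟩ := List.exists_cons_of_ne_nil hne
    obtain ⟨ts, hts⟩ := ts0
    rw [hSsum]
    have hall : ∀ x ∈ times.map (fun t => pvD times / t), 0 < x := by
      intro x hx
      obtain ⟨t, ht, rfl⟩ := List.mem_map.1 hx
      have h1 : 1 ≤ pvD times / t := by
        rw [Int.le_ediv_iff_mul_le (hpos t ht), one_mul]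
        exact Int.le_of_dvd hD (hdvdD t ht)
      omega
    have hmem : pvD times / t0 ∈ times.map (fun t => pvD times / t) :=
      List.mem_map.2 ⟨t0, by rw [hts]; exact List.mem_cons_self .., rfl⟩
    calc (0 : Int) < pvD times / t0 := hall _ hmem
      _ ≤ _ := List.single_le_sum (fun x hx => le_of_lt (hall x hx)) _ hmem
  -- window bounds
  have hcount_r : n ≤ pvCount times r := hr.2.1
  have hr0 : 0 ≤ r := hr.1
  have hr1 : 1 ≤ r := by
    rcases eq_or_lt_of_le hr0 with h | h
    · exfalso; rw [← h] at hcount_r; rw [cnt_zero] at hcount_r; omega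
    · omega
  have hrS : n * pvD times ≤ r * pvS times := by
    have h1 : pvCount times r * pvD times ≤ r * pvS times := by
      rw [pvCount_eq_sum times r hpos, hSsum]
      exact sum_upper hD r times hcond
    have h2 : n * pvD times ≤ pvCount times r * pvD times :=
      mul_le_mul_of_nonneg_right hcount_r (by omega)
    omega
  have hLr : pvL n times ≤ r := by
    unfold pvL
    have : -r ≤ PySem.Int.floordiv (-n * pvD times) (pvS times) := by
      rw [PySem.Int.le_floordiv_iff_mul_le hS]
      nlinarith [hrS]
    omega
  have hL1 : 1 ≤ pvL n times := by
    unfold pvL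
    have : PySem.Int.floordiv (-n * pvD times) (pvS times) < 0 := by
      rw [PySem.Int.floordiv_lt_iff_lt_mul hS]
      nlinarith [hD]
    omega
  have hUS : (n + times.length) * pvD times ≤ pvU n times * pvS times := by
    have h1 : PySem.Int.floordiv (-(n + times.length) * pvD times) (pvS times) * pvS times ≤
        -(n + times.length) * pvD times :=
      (PySem.Int.le_floordiv_iff_mul_le hS).1 le_rfl
    unfold pvU
    nlinarith [h1]
  have hcountU : n ≤ pvCount times (pvU n times) := by
    have h1 : pvU n times * ((times.map (fun t => pvD times / t)).sum) -
        times.length * pvD times + times.length ≤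
        ((times.map (fun t => pvU n times / t)).sum) * pvD times :=
      sum_lower hD (pvU n times) times hcond
    rw [← hSsum] at h1
    rw [← pvCount_eq_sum times (pvU n times) hpos] at h1
    by_contra hlt
    push_neg at hlt
    have h2 : pvCount times (pvU n times) * pvD times ≤ (n - 1) * pvD times :=
      mul_le_mul_of_nonneg_right (by omega) (by omega)
    nlinarith [hUS, h1, h2, hD]
  have hLU : pvL n times ≤ pvU n times := by
    unfold pvL pvU
    have hq : PySem.Int.floordiv (-(n + times.length) * pvD times) (pvS times) ≤
        PySem.Int.floordiv (-n * pvD times) (pvS times) := by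
      rw [PySem.Int.le_floordiv_iff_mul_le hS]
      have h1 := (PySem.Int.le_floordiv_iff_mul_le hS).1
        (le_refl (PySem.Int.floordiv (-(n + times.length) * pvD times) (pvS times)))
      have hm : (0 : Int) ≤ (times.length : Int) := by positivity
      nlinarith [h1, hD]
    omega
  have hrU : r ≤ pvU n times := by
    by_contra hgt
    push_neg at hgt
    have hU0 : 0 ≤ pvU n times := by omega
    exact absurd hcountU (not_le.2 (hr.2.2 _ hU0 hgt))
  -- r is an enumerated candidate
  have hjump : ∃ t ∈ times, t ∣ r := by
    apply exists_dvd_of_count_jump hpos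
    have := hr.2.2 (r - 1) (by omega) (by omega)
    omega
  obtain ⟨t0, ht0, hdvd0⟩ := hjump
  have ht0p := hpos t0 ht0
  have hk0 : r / t0 * t0 = r := Int.ediv_mul_cancel hdvd0
  have hkmem : r / t0 ∈ PySem.List.pyRange
      (PySem.Int.floordiv (pvL n times + t0 - 1) t0)
      (PySem.Int.floordiv (pvU n times) t0 + 1) 1 := by
    rw [PySem.List.mem_pyRange_one, PySem.Int.floordiv_eq_ediv_of_pos ht0p,
      PySem.Int.floordiv_eq_ediv_of_pos ht0p]
    constructor
    · have : (pvL n times + t0 - 1) / t0 < r / t0 + 1 := by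
        rw [Int.ediv_lt_iff_lt_mul ht0p, add_mul, one_mul, hk0]
        omega
      omega
    · have : r / t0 ≤ pvU n times / t0 := by
        rw [Int.le_ediv_iff_mul_le ht0p, hk0]
        exact hrU
      omega
  -- conclude
  unfold solution_alt
  rw [if_neg (by omega)]
  rw [outer_hit hr hcount_r hL1 times none hpos (fun b hb => by simp at hb)
    ⟨t0, ht0, r / t0, hkmem, hk0⟩]
  rfl

lemma solution_alt_nonpos {times : List Int} {n : Int} (hn : n ≤ 0) :
    solution_alt n times = 0 := by
  unfold solution_alt
  rw [if_pos hn]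

-- ===== VERDICT (by name: the statement is the Claim_ definition above) =====
theorem solution_spec : Claim_equal_solution := by
  intro n times _hdom hpre
  obtain ⟨hne, hcase⟩ := hpre
  unfold Spec_solution
  obtain ⟨M, hMeq⟩ : ∃ M, PySem.List.max? times (fun t => t) = some M := by
    cases h : PySem.List.max? times (fun t => t) with
    | none => exact absurd ((PySem.List.max?_eq_none_iff times (fun t => t)).1 h) hne
    | some M => exact ⟨M, rfl⟩
  have hMmem := PySem.List.max?_mem hMeq
  rcases hcase with hpos | ⟨hn, t0, ht0, ht0pos⟩ | ⟨hn0, hz⟩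
  · -- the natural domain: all booth times positive
    have hMpos := hpos M hMmem
    have hA : IsAns n times (solution n times) := by
      unfold solution
      rw [hMeq]
      simp only [Option.getD_some]
      by_cases hR : 0 ≤ M * n
      · refine loopA_correct hpos ⟨M, hMmem, rfl⟩ ((M * n + 1 - 0).toNat) 0 (M * n) 0
          le_rfl le_rfl (by omega) (fun T hT hT' => by omega) (Or.inl ⟨rfl, rfl⟩)
      · rw [pvLoopA, dif_neg (by omega)]
        have hn : n < 0 := by
          by_contra h
          exact hR (mul_nonneg (le_of_lt hMpos) (by omega))
        refine ⟨le_rfl, ?_, fun T hT hT' => by omega⟩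
        have := cnt_nonneg hpos (le_refl (0 : Int))
        omega
    rcases le_or_gt n 0 with hn | hn
    · rw [isAns_nonpos hpos hn hA, solution_alt_nonpos hn]
    · exact (solution_alt_eq hpos hne hn hA).symm
  · -- n < 0 with some positive time: rt = max·n < 0, both return 0 at once
    have hMpos : 0 < M := lt_of_lt_of_le ht0pos (PySem.List.max?_isMax hMeq t0 ht0)
    have hMn : M * n < 0 := mul_neg_of_pos_of_neg hMpos hn
    rw [solution_alt_nonpos (by omega)]
    unfold solution
    rw [hMeq]
    simp only [Option.getD_some]
    rw [pvLoopA, dif_neg (by omega)]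
  · -- n = 0 with no zero time: rt = 0, the single probe mid = 0 counts 0 people, both return 0
    subst hn0
    have hmid : PySem.Int.floordiv (0 + 0) 2 = 0 := by decide
    rw [solution_alt_nonpos le_rfl]
    unfold solution
    rw [hMeq]
    simp only [Option.getD_some, mul_zero]
    rw [pvLoopA, dif_pos le_rfl, hmid, cnt_zero, if_neg (lt_irrefl 0)]
    rw [pvLoopA, dif_neg (by omega)]
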